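-- pv_equiv track=rewrite | github.com/duc180701/Code_PTIT | Python/PY01059-tongchusotichchuso.py | mul_odd_posi
-- ===== SOURCE A (Python) =====
-- def all_odd_posi_is_0(s):
--     for i in range(1, len(s), 2):
--         if s[i] != "0":
--             return False
--     return True
--
-- def mul_odd_posi(s):
--     mul = 0
--     if all_odd_posi_is_0(s) == True:
--         return mul
--     else:
--         mul = 1
--         for i in range(1, len(s), 2):
--             if s[i] != "0":
--                 mul *= int(s[i])
--         return mul
-- ===== SOURCE B (Python) =====
-- def mul_odd_posi(s):
--     mul = 1
--     any_nonzero = False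
--     for ch in s[1::2]:
--         if ch != "0":
--             any_nonzero = True
--             mul *= int(ch)
--     return mul if any_nonzero else 0
-- ===== Notes on version B (the rewrite author's own statement) =====
-- stated objective: simpler
-- what changed: Replaces A's two sequential scans (a precheck whether all odd-position chars are the zero digit, then a product loop) by a single pass over s[1::2] that keeps the running product and an any_nonzero flag.
import Mathlib
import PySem

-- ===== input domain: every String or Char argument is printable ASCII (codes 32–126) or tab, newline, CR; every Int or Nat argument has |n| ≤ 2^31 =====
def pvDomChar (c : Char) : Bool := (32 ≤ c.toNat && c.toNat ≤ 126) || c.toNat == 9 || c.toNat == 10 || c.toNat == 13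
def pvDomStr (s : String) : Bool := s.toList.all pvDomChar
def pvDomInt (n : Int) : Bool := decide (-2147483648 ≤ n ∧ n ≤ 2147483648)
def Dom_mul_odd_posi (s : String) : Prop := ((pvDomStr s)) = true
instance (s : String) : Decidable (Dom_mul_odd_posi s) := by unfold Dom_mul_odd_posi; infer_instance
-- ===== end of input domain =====

-- B fuses A's two scans (all-'0' precheck, then product loop) into one pass with an any_nonzero flag.

-- int(c) for a single character, via PySem.Int.ofStr?; exact when c is a digit (Pre_ guarantees that)
def pyIntChar (c : Char) : Int := (PySem.Int.ofStr? (String.mk [c])).getD 0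

-- ===== PORT A =====
-- for i in range(1, len(s), 2): if s[i] != "0": return False / return True
def allOdd0 : List Char → Bool
  | _a :: b :: rest => if b ≠ '0' then false else allOdd0 rest
  | _ => true

-- mul = 1; for i in range(1, len(s), 2): if s[i] != "0": mul *= int(s[i])
def aLoop (acc : Int) : List Char → Int
  | _a :: b :: rest => aLoop (if b ≠ '0' then acc * pyIntChar b else acc) rest
  | _ => acc

def mul_odd_posi (s : String) : Int :=
  if allOdd0 s.toList = true then 0 else aLoop 1 s.toList

-- ===== PORT B =====
-- s[1::2]
def oddsOf : List Char → List Char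
  | _a :: b :: rest => b :: oddsOf rest
  | _ => []

-- loop body: if ch != "0": any_nonzero = True; mul *= int(ch)
def bStep (p : Int × Bool) (c : Char) : Int × Bool :=
  if c ≠ '0' then (p.1 * pyIntChar c, true) else p

def mul_odd_posi_alt (s : String) : Int :=
  let p := (oddsOf s.toList).foldl bStep (1, false)
  if p.2 then p.1 else 0

-- ===== PRECONDITION & SPEC =====
-- Pre_ excludes inputs with a non-digit character at an odd index other than the all-zeros case:
-- there int of that character raises ValueError in A (and in B as well).
def Pre_mul_odd_posi (s : String) : Prop :=
  (∀ i, i < s.toList.length → i % 2 = 1 → (s.toList.getD i ' ').isDigit = true) ∨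
  (∀ i, i < s.toList.length → i % 2 = 1 → s.toList.getD i ' ' = '0')
instance (s : String) : Decidable (Pre_mul_odd_posi s) := by unfold Pre_mul_odd_posi; infer_instance

def pvWitness_mul_odd_posi : String := "a1b2"

def Spec_mul_odd_posi (s : String) (out : Int) : Prop := out = mul_odd_posi_alt s
instance (s : String) (out : Int) : Decidable (Spec_mul_odd_posi s out) := by unfold Spec_mul_odd_posi; infer_instance

-- ===== CLAIM (what is proved, stated in full; the proofs are below) =====
def Claim_equal_mul_odd_posi : Prop := ∀ (s : String), Dom_mul_odd_posi s → Pre_mul_odd_posi s → Spec_mul_odd_posi s (mul_odd_posi s)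

-- ===== LEMMAS AND PROOFS =====

def fStep (a : Int) (c : Char) : Int := if c ≠ '0' then a * pyIntChar c else a

theorem aLoop_eq_foldl (l : List Char) : ∀ acc : Int, aLoop acc l = (oddsOf l).foldl fStep acc := by
  induction l using oddsOf.induct with
  | case1 a b rest ih =>
      intro acc
      simp [aLoop, oddsOf, List.foldl, fStep, ih]
  | case2 l h => intro acc; cases l with
      | nil => simp [aLoop, oddsOf]
      | cons a t => cases t with
          | nil => simp [aLoop, oddsOf]
          | cons b r => exact absurd rfl (h a b r)

theorem foldl_bStep_true (cs : List Char) : ∀ m : Int, cs.foldl bStep (m, true) = (cs.foldl fStep m, true) := by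
  induction cs with
  | nil => intro m; rfl
  | cons c rest ih =>
      intro m
      by_cases h : c = '0' <;> simp [List.foldl, bStep, fStep, h, ih]

theorem main_eq (l : List Char) :
    (if allOdd0 l = true then 0 else aLoop 1 l) =
      (let p := (oddsOf l).foldl bStep (1, false); if p.2 then p.1 else 0) := by
  induction l using oddsOf.induct with
  | case1 a b rest ih =>
      by_cases h : b = '0'
      · simpa [allOdd0, aLoop, oddsOf, List.foldl, bStep, h] using ih
      · simp [allOdd0, aLoop, oddsOf, bStep, h, foldl_bStep_true, aLoop_eq_foldl]
  | case2 l h => cases l with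
      | nil => simp [allOdd0, oddsOf]
      | cons a t => cases t with
          | nil => simp [allOdd0, oddsOf]
          | cons b r => exact absurd rfl (h a b r)

-- ===== VERDICT (by name: the statement is the Claim_ definition above) =====
theorem mul_odd_posi_spec : Claim_equal_mul_odd_posi := by
  intro s _ _
  unfold Spec_mul_odd_posi mul_odd_posi mul_odd_posi_alt
  exact main_eq s.toList
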